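-- pv_equiv track=rewrite | github.com/thereal1024/advent_of_code | 2023/13/solution-secondary.py | find_mirror
-- ===== SOURCE A (Python) =====
-- def find_mirror(pattern, skip=None):
--     for i in range(len(pattern) - 1):
--         if i+1 == skip:
--             continue
--         sym = True
--         for j in range(min(i+1, len(pattern)-i-1)):
--             l, r = i-j, i+1+j
--             if pattern[l] != pattern[r]:
--                 sym = False
--                 break
--         if sym:
--             return i+1
--     return None
-- ===== SOURCE B (Python) =====
-- def find_mirror(pattern, skip=None):
--     n = len(pattern)
--     return next(
--         (k for k in range(1, n)
--          if k != skip and pattern[k - 1] == pattern[k]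
--          and pattern[k:2 * k] == pattern[:k][::-1][:n - k]),
--         None)
-- ===== Notes on version B (the rewrite author's own statement) =====
-- stated objective: idiomatic
-- what changed: B replaces A's nested index loop with a sym flag and break by a single generator over boundaries that, after a cheap adjacent-row short-circuit, compares the reversed prefix slice with the suffix slice as whole lists, returned via next(..., None).
import Mathlib
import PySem

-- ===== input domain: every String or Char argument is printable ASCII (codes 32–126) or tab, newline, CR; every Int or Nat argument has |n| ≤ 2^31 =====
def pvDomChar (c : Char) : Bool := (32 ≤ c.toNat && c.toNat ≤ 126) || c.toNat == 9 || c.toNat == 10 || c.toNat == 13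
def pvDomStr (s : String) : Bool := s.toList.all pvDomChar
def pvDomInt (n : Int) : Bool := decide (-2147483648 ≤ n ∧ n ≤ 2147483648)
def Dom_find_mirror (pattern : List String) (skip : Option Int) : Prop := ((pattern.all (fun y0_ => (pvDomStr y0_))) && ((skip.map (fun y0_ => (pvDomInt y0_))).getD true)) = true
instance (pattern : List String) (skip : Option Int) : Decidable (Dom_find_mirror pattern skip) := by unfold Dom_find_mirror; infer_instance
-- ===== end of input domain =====

-- ===== PORT A =====
-- B replaces A's nested index loop (sym flag + break) by a per-boundary comparison of
-- whole slices; same asymptotic cost, plainer code. Equivalence proved on all of Dom.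

-- inner 'for j in range(...)' loop with its break: returns the final value of 'sym'
def fmInner (pattern : List String) (i : Int) : List Int → Bool
  | [] => true
  | j :: js =>
    if PySem.List.pyGet? pattern (i - j) ≠ PySem.List.pyGet? pattern (i + 1 + j) then false
    else fmInner pattern i js

-- outer 'for i in range(len(pattern)-1)' loop with continue / return
def fmOuter (pattern : List String) (skip : Option Int) : List Int → Option Int
  | [] => none
  | i :: is =>
    if skip = some (i + 1) then fmOuter pattern skip is
    else if fmInner pattern i
        (PySem.List.pyRange 0 (min (i + 1) ((pattern.length : Int) - i - 1)) 1) then some (i + 1)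
    else fmOuter pattern skip is

def find_mirror (pattern : List String) (skip : Option Int) : Option Int :=
  fmOuter pattern skip (PySem.List.pyRange 0 ((pattern.length : Int) - 1) 1)

-- ===== PORT B =====
-- generator over k in range(1, n); 'pattern[:k][::-1]' is (slice …).reverse (PySem.List.slice?_none_none_neg_one)
def fmAltGo (pattern : List String) (skip : Option Int) (n : Int) : List Int → Option Int
  | [] => none
  | k :: ks =>
    if skip ≠ some k ∧ PySem.List.pyGet? pattern (k - 1) = PySem.List.pyGet? pattern k ∧
        PySem.List.slice pattern (some k) (some (2 * k)) =
          PySem.List.slice ((PySem.List.slice pattern none (some k)).reverse) none (some (n - k))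
    then some k
    else fmAltGo pattern skip n ks

def find_mirror_alt (pattern : List String) (skip : Option Int) : Option Int :=
  fmAltGo pattern skip (pattern.length : Int) (PySem.List.pyRange 1 (pattern.length : Int) 1)

-- ===== PRECONDITION & SPEC =====
def Spec_find_mirror (pattern : List String) (skip : Option Int) (out : Option Int) : Prop := out = find_mirror_alt pattern skip
instance (pattern : List String) (skip : Option Int) (out : Option Int) : Decidable (Spec_find_mirror pattern skip out) := by unfold Spec_find_mirror; infer_instance

-- ===== CLAIM (what is proved, stated in full; the proofs are below) =====
def Claim_equal_find_mirror : Prop := ∀ (pattern : List String) (skip : Option Int), Dom_find_mirror pattern skip → Spec_find_mirror pattern skip (find_mirror pattern skip)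

-- ===== LEMMAS AND PROOFS =====

theorem fmInner_eq_all (pattern : List String) (i : Int) (js : List Int) :
    fmInner pattern i js =
      js.all (fun j => decide (PySem.List.pyGet? pattern (i - j) = PySem.List.pyGet? pattern (i + 1 + j))) := by
  induction js with
  | nil => rfl
  | cons j js ih =>
    simp only [fmInner, List.all_cons]
    by_cases h : PySem.List.pyGet? pattern (i - j) = PySem.List.pyGet? pattern (i + 1 + j)
    · simp [h, ih]
    · simp [h]

theorem ptwise (pattern : List String) (k jN : Nat) (h1 : jN < k) (h2 : k + jN < pattern.length) :
    (PySem.List.pyGet? pattern ((k : Int) - 1 - (jN : Int)) =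
        PySem.List.pyGet? pattern ((k : Int) - 1 + 1 + (jN : Int))) ↔
      pattern[k - 1 - jN]'(by omega) = pattern[k + jN]'h2 := by
  rw [PySem.List.pyGet?_eq_some_getElem pattern (i := (k : Int) - 1 - (jN : Int)) (by omega) (by omega),
      PySem.List.pyGet?_eq_some_getElem pattern (i := (k : Int) - 1 + 1 + (jN : Int)) (by omega) (by omega)]
  have e1 : ((k : Int) - 1 - (jN : Int)).toNat = k - 1 - jN := by omega
  have e2 : ((k : Int) - 1 + 1 + (jN : Int)).toNat = k + jN := by omega
  simp only [e1, e2, Option.some.injEq]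

theorem inner_slice (pattern : List String) (k : Nat) (hk1 : 1 ≤ k) (hkL : k < pattern.length) :
    (fmInner pattern ((k : Int) - 1)
        (PySem.List.pyRange 0 (min ((k : Int)) ((pattern.length : Int) - (k : Int))) 1) = true) ↔
      PySem.List.slice pattern (some (k : Int)) (some (2 * (k : Int))) =
        PySem.List.slice ((PySem.List.slice pattern none (some (k : Int))).reverse) none
          (some ((pattern.length : Int) - (k : Int))) := by
  have hL : k ≤ pattern.length := le_of_lt hkL
  have h1 : PySem.List.slice pattern (some (k : Int)) (some (2 * (k : Int))) =
      (pattern.drop k).take k := by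
    have e : (2 * (k : Int)) = ((2 * k : Nat) : Int) := by push_cast; ring
    rw [e, PySem.List.slice_natCast]
    congr 1
    omega
  have h2 : PySem.List.slice pattern none (some (k : Int)) = pattern.take k :=
    PySem.List.slice_to_natCast pattern k
  have h3 : PySem.List.slice ((pattern.take k).reverse) none
      (some ((pattern.length : Int) - (k : Int))) =
      (pattern.take k).reverse.take (pattern.length - k) := by
    have e : ((pattern.length : Int) - (k : Int)) = ((pattern.length - k : Nat) : Int) := by omega
    rw [e, PySem.List.slice_to_natCast]
  rw [h1, h2, h3, fmInner_eq_all, List.all_eq_true]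
  have hlen1 : ((pattern.drop k).take k).length = min k (pattern.length - k) := by
    simp
  have hlen2 : ((pattern.take k).reverse.take (pattern.length - k)).length =
      min k (pattern.length - k) := by
    simp
    omega
  constructor
  · intro h
    apply List.ext_getElem (by rw [hlen1, hlen2])
    intro n hn1 hn2
    have hn : n < min k (pattern.length - k) := hlen1 ▸ hn1
    have hmem : (n : Int) ∈ PySem.List.pyRange 0 (min ((k : Int)) ((pattern.length : Int) - (k : Int))) 1 := by
      rw [PySem.List.mem_pyRange_one]
      constructor
      · omega
      · rw [lt_min_iff]
        constructor <;> omega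
    have := (decide_eq_true_iff).mp (h (n : Int) hmem)
    have hp := (ptwise pattern k n (by omega) (by omega)).mp this
    have hrev : ((pattern.take k).reverse.take (pattern.length - k))[n] =
        pattern[k - 1 - n]'(by omega) := by
      rw [List.getElem_take, List.getElem_reverse, List.getElem_take]
      congr 1
      simp
      omega
    rw [List.getElem_take, List.getElem_drop, hrev]
    exact hp.symm
  · intro heq j hj
    rw [PySem.List.mem_pyRange_one] at hj
    obtain ⟨hj0, hjm⟩ := hj
    rw [lt_min_iff] at hjm
    set jN := j.toNat with hjN
    have hjeq : (jN : Int) = j := by omega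
    rw [decide_eq_true_iff, ← hjeq]
    apply (ptwise pattern k jN (by omega) (by omega)).mpr
    have h2' : jN < min k (pattern.length - k) := by omega
    have := List.getElem_of_eq heq (i := jN) (w := by rw [hlen1]; omega)
    rw [List.getElem_take, List.getElem_drop] at this
    have hrev : ((pattern.take k).reverse.take (pattern.length - k))[jN]'(by rw [hlen2]; omega) =
        pattern[k - 1 - jN]'(by omega) := by
      rw [List.getElem_take, List.getElem_reverse, List.getElem_take]
      congr 1
      simp
      omega
    rw [hrev] at this
    exact this.symm

theorem outer_eq (pattern : List String) (skip : Option Int) (ts : List Nat)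
    (hts : ∀ t ∈ ts, (t : Int) < (pattern.length : Int) - 1) :
    fmOuter pattern skip (ts.map (fun (t : Nat) => (0 : Int) + (t : Int))) =
      fmAltGo pattern skip (pattern.length : Int) (ts.map (fun (t : Nat) => (1 : Int) + (t : Int))) := by
  induction ts with
  | nil => rfl
  | cons t ts ih =>
    have ht : (t : Int) < (pattern.length : Int) - 1 := hts t (List.mem_cons_self ..)
    have ih' := ih (fun x hx => hts x (List.mem_cons_of_mem _ hx))
    simp only [List.map_cons, fmOuter, fmAltGo]
    have e0 : (0 : Int) + (t : Int) = (t : Int) := by ring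
    have e1 : (1 : Int) + (t : Int) = (t : Int) + 1 := by ring
    rw [e0, e1]
    have hk := inner_slice pattern (t + 1) (by omega) (by omega)
    have ek : ((t + 1 : Nat) : Int) = (t : Int) + 1 := by push_cast; ring
    rw [ek] at hk
    have ei : ((t : Int) + 1 - 1) = (t : Int) := by ring
    rw [ei] at hk
    have em : ((pattern.length : Int) - (t : Int) - 1) = (pattern.length : Int) - ((t : Int) + 1) := by
      ring
    rw [em]
    have eg : ((t : Int) + 1 - 1) = (t : Int) := by ring
    rw [eg]
    by_cases hs : skip = some ((t : Int) + 1)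
    · rw [if_pos hs, if_neg (by simp [hs]), ih']
    · rw [if_neg hs]
      by_cases hm : PySem.List.slice pattern (some ((t : Int) + 1)) (some (2 * ((t : Int) + 1))) =
          PySem.List.slice ((PySem.List.slice pattern none (some ((t : Int) + 1))).reverse) none
            (some ((pattern.length : Int) - ((t : Int) + 1)))
      · have hinner := hk.mpr hm
        have hg : PySem.List.pyGet? pattern ((t : Int)) = PySem.List.pyGet? pattern ((t : Int) + 1) := by
          rw [fmInner_eq_all, List.all_eq_true] at hinner
          have h0 := hinner 0 (by
            rw [PySem.List.mem_pyRange_one]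
            refine ⟨le_refl 0, ?_⟩
            rw [lt_min_iff]
            constructor <;> omega)
          rw [decide_eq_true_iff] at h0
          simpa using h0
        rw [if_pos (hk.mpr hm), if_pos ⟨hs, hg, hm⟩]
      · rw [if_neg (fun h => hm (hk.mp h)), if_neg (fun h => hm h.2.2), ih']

-- ===== VERDICT (by name: the statement is the Claim_ definition above) =====
theorem find_mirror_spec : Claim_equal_find_mirror := by
  intro pattern skip _
  unfold Spec_find_mirror find_mirror find_mirror_alt
  rw [PySem.List.pyRange_one 0 ((pattern.length : Int) - 1), PySem.List.pyRange_one 1 (pattern.length : Int)]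
  have h1 : ((pattern.length : Int) - 1 - 0).toNat = ((pattern.length : Int) - 1).toNat := by omega
  rw [h1]
  exact outer_eq pattern skip (List.range ((pattern.length : Int) - 1).toNat) (by
    intro t ht; simp only [List.mem_range] at ht; omega)
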